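-- pv_equiv track=rewrite | github.com/mko3000/tira | tira_vk2/onechar.py | count
-- ===== SOURCE A (Python) =====
-- def count(s):
--     curstrings = 0
--     substrings = 0
--     i = 0
--     for l in range(len(s)):
--         i += 1
--         curstrings += i
--         try:
--             if s[l] != s[l+1]:
--                 substrings += curstrings
--                 i=0
--                 curstrings = 0
--         except:
--             substrings+=curstrings
--     return substrings
-- ===== SOURCE B (Python) =====
-- def count(s):
--     total = 0
--     i = 0
--     n = len(s)
--     while i < n:
--         j = i + 1
--         while j < n and s[j] == s[i]:
--             j += 1
--         m = j - i
--         total += m * (m + 1) // 2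
--         i = j
--     return total
-- ===== Notes on version B (the rewrite author's own statement) =====
-- stated objective: simpler
-- what changed: B scans maximal runs of equal characters and adds the closed form m*(m+1)//2 per run, replacing A's per-character running accumulator with lookahead and try/except boundary detection.
import Mathlib
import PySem

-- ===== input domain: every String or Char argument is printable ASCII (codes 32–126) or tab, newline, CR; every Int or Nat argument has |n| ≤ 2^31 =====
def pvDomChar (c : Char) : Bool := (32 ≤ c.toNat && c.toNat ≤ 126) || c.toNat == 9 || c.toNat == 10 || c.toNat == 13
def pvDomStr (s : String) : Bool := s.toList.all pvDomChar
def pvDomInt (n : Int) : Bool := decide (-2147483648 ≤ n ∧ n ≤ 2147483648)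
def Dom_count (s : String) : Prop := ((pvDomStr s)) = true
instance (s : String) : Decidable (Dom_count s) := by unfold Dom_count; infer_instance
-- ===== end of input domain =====

-- B replaces A's per-character running accumulator with lookahead-and-except boundary
-- detection by a pass over maximal runs of equal characters, adding m*(m+1)//2 per run (simpler).

-- ===== PORT A =====
-- state = (curstrings, substrings, i); the bare 'except' arm is exactly the case where s[l+1]
-- is out of range (l+1 = len(s)), i.e. pyGet? returns none.
def countStep (cs : List Char) (st : Int × Int × Int) (l : Int) : Int × Int × Int :=
  let curstrings := st.1
  let substrings := st.2.1
  let i := st.2.2 + 1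
  let curstrings := curstrings + i
  match PySem.List.pyGet? cs l, PySem.List.pyGet? cs (l + 1) with
  | some a, some b =>
      if a ≠ b then (0, substrings + curstrings, 0)
      else (curstrings, substrings, i)
  | _, _ => (curstrings, substrings + curstrings, i)

def count (s : String) : Int :=
  let cs := s.toList
  ((PySem.List.pyRange 0 (cs.length : Int) 1).foldl (countStep cs) (0, 0, 0)).2.1

-- ===== PORT B =====
-- Source B's inner while loop scans the current run (takeWhile) and then jumps past it (dropWhile).
def countAltGo : List Char → Int
  | [] => 0
  | c :: t =>
    let m : Int := (((t.takeWhile (· == c)).length + 1 : Nat) : Int)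
    PySem.Int.floordiv (m * (m + 1)) 2 + countAltGo (t.dropWhile (· == c))
termination_by t => t.length
decreasing_by
  have := List.length_dropWhile_le (· == c) t
  simp; omega

def count_alt (s : String) : Int := countAltGo s.toList

-- ===== PRECONDITION & SPEC =====
def Spec_count (s : String) (out : Int) : Prop := out = count_alt s
instance (s : String) (out : Int) : Decidable (Spec_count s out) := by unfold Spec_count; infer_instance

-- ===== CLAIM (what is proved, stated in full; the proofs are below) =====
def Claim_equal_count : Prop := ∀ (s : String), Dom_count s → Spec_count s (count s)

-- ===== LEMMAS AND PROOFS =====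

-- A's loop rewritten as structural recursion on the suffix still to be processed.
def goA : List Char → Int → Int → Int → Int
  | [], _, sub, _ => sub
  | a :: rest, cur, sub, i =>
    let i := i + 1
    let cur := cur + i
    match rest with
    | [] => sub + cur
    | b :: _ => if a ≠ b then goA rest 0 (sub + cur) 0 else goA rest cur sub i

-- triangular numbers, the value curstrings holds after i consecutive equal characters
def T : Nat → Int
  | 0 => 0
  | n + 1 => T n + (n + 1)

lemma bridge (suf pre : List Char) (cur sub i : Int) :
    ((PySem.List.pyRange (pre.length : Int) ((pre.length + suf.length : Nat) : Int) 1).foldl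
      (countStep (pre ++ suf)) (cur, sub, i)).2.1 = goA suf cur sub i := by
  induction suf generalizing pre cur sub i with
  | nil => simp [goA, PySem.List.pyRange_zero]
  | cons a rest ih =>
    have hlt : (pre.length : Int) < ((pre.length + (a :: rest).length : Nat) : Int) := by
      simp
    rw [PySem.List.pyRange_one_cons hlt]
    simp only [List.foldl_cons]
    have h1 : PySem.List.pyGet? (pre ++ a :: rest) (pre.length : Int) = some a :=
      PySem.List.pyGet?_append_length pre rest a
    have h2 : PySem.List.pyGet? (pre ++ a :: rest) ((pre.length : Int) + 1) = rest[0]? := by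
      have := PySem.List.pyGet?_append_right (pre := pre) (ys := a :: rest) (k := 1)
      simpa using this
    have harith : ((pre.length : Int) + 1) = (((pre ++ [a]).length : Nat) : Int) := by
      simp
    have hlen : ((pre.length + (a :: rest).length : Nat) : Int)
        = (((pre ++ [a]).length + rest.length : Nat) : Int) := by
      simp; omega
    cases rest with
    | nil =>
      simp only [countStep, h1, h2, List.getElem?_nil]
      rw [PySem.List.pyRange_one]
      simp [goA]
    | cons b rest' =>
      simp only [countStep, h1, h2, List.getElem?_cons_zero]
      by_cases hab : a = b
      · subst hab
        simp only [ne_eq, not_true_eq_false, ite_false]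
        rw [harith, hlen, show pre ++ a :: a :: rest' = (pre ++ [a]) ++ a :: rest' from by simp,
          ih (pre ++ [a])]
        simp [goA]
      · simp only [ne_eq, hab, not_false_eq_true, ite_true]
        rw [harith, hlen, show pre ++ a :: b :: rest' = (pre ++ [a]) ++ b :: rest' from by simp,
          ih (pre ++ [a])]
        simp [goA, hab]

lemma count_eq_goA (s : String) : count s = goA s.toList 0 0 0 := by
  have h := bridge s.toList [] 0 0 0
  simpa [count] using h

lemma T_succ (n : Nat) : T (n + 1) = T n + (n + 1) := rfl

lemma T_eq_nat (m : Nat) : T m = ((m * (m + 1) / 2 : Nat) : Int) := by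
  induction m with
  | zero => simp [T]
  | succ n ih =>
    have hsplit : (n + 1) * (n + 1 + 1) = n * (n + 1) + (n + 1) * 2 := by ring
    rw [T_succ, ih, hsplit, Nat.add_mul_div_right _ _ (by norm_num)]
    push_cast
    ring

lemma T_floordiv (m : Nat) :
    PySem.Int.floordiv ((m : Int) * ((m : Int) + 1)) 2 = T m := by
  have hcast : ((m : Int) * ((m : Int) + 1)) = ((m * (m + 1) : Nat) : Int) := by push_cast; ring
  rw [hcast, show (2 : Int) = ((2 : Nat) : Int) from rfl, PySem.Int.floordiv_natCast, T_eq_nat]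

-- one maximal run of A's loop, entered mid-run with counter j and curstrings = T j
lemma goA_run (t : List Char) (c : Char) (j : Nat) (sub : Int) :
    goA (c :: t) (T j) sub (j : Int) =
      if (t.dropWhile (· == c)).isEmpty then sub + T (j + 1 + (t.takeWhile (· == c)).length)
      else goA (t.dropWhile (· == c)) 0 (sub + T (j + 1 + (t.takeWhile (· == c)).length)) 0 := by
  induction t generalizing c j sub with
  | nil =>
    have h : T j + ((j : Int) + 1) = T (j + 1 + 0) := by
      rw [Nat.add_zero, T_succ]
    simp only [goA, List.dropWhile_nil, List.takeWhile_nil, List.isEmpty_nil, if_true,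
      List.length_nil]
    rw [h]
  | cons b t' ih =>
    by_cases hbc : b = c
    · subst hbc
      have hstep : goA (b :: b :: t') (T j) sub (j : Int)
          = goA (b :: t') (T (j + 1)) sub ((j : Int) + 1) := by
        simp [goA, T_succ]
      rw [hstep, show ((j : Int) + 1) = ((j + 1 : Nat) : Int) from by push_cast; ring,
        ih b (j + 1) sub]
      simp only [List.takeWhile_cons, List.dropWhile_cons, BEq.rfl, if_true,
        List.length_cons]
      have harith : j + 1 + 1 + (t'.takeWhile (· == b)).length
          = j + 1 + ((t'.takeWhile (· == b)).length + 1) := by omega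
      simp [harith]
    · have hneq : (b == c) = false := by simp [hbc]
      have hcb : ¬ c = b := fun h => hbc h.symm
      have harith : T j + ((j : Int) + 1) = T (j + 1 + 0) := by
        rw [Nat.add_zero, T_succ]
      simp only [List.takeWhile_cons, List.dropWhile_cons, hneq, if_false,
        List.length_nil, List.isEmpty_cons]
      simp only [goA, ne_eq, hcb, not_false_eq_true, ite_true]
      rw [harith]
      cases t' <;> simp [goA]

theorem goA_eq_countAltGo (cs : List Char) (sub : Int) :
    goA cs 0 sub 0 = sub + countAltGo cs := by
  match cs with
  | [] => simp [goA, countAltGo]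
  | c :: t =>
    have hrec := goA_eq_countAltGo (t.dropWhile (· == c)) (sub + T (0 + 1 + (t.takeWhile (· == c)).length))
    have hr := goA_run t c 0 sub
    rw [show T 0 = (0 : Int) from rfl, Nat.cast_zero] at hr
    rw [hr, countAltGo]
    rw [T_floordiv ((t.takeWhile (· == c)).length + 1)]
    by_cases hemp : (t.dropWhile (· == c)).isEmpty
    · have hnil : t.dropWhile (· == c) = [] := List.isEmpty_iff.mp hemp
      simp only [hnil, countAltGo]
      simp [Nat.add_comm]
    · simp only [hemp, if_false]
      rw [hrec]
      simp [Nat.add_comm, add_assoc]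
termination_by cs.length
decreasing_by
  have := List.length_dropWhile_le (· == c) t
  simp
  omega

-- ===== VERDICT (by name: the statement is the Claim_ definition above) =====
theorem count_spec : Claim_equal_count := by
  intro s _
  unfold Spec_count count_alt
  rw [count_eq_goA, goA_eq_countAltGo]
  ring
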